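-- pv_equiv track=rewrite | github.com/dmitriy-chizhov90/knuth-examples | ex_1_1.py | euclidesE1Cnt
-- ===== SOURCE A (Python) =====
-- def euclidesE1Cnt(m, n):
--     if n == 0:
--         return 0
--     cnt = 0
--     while True:
--         r = m % n
--         cnt += 1
--         if r == 0:
--             return cnt
--         m, n = n, r
-- ===== SOURCE B (Python) =====
-- def euclidesE1Cnt(m, n):
--     if n == 0:
--         return 0
--     r = m % n
--     return 1 if r == 0 else 1 + euclidesE1Cnt(n, r)
-- ===== Notes on version B (the rewrite author's own statement) =====
-- stated objective: simpler
-- what changed: The while-True loop with a mutable counter is replaced by direct structural recursion on the GCD process, returning 1 + count of the tail; no loop state is threaded.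
import Mathlib
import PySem

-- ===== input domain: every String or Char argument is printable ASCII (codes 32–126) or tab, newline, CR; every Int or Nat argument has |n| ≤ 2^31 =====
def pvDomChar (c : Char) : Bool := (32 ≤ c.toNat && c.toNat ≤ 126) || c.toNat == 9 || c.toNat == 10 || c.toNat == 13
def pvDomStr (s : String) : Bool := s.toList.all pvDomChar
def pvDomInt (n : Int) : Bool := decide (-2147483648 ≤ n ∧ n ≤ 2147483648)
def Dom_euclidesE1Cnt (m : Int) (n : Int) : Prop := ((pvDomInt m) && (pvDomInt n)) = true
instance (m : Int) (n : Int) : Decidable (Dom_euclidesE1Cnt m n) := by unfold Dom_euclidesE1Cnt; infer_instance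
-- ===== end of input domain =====

-- B replaces A's while-True loop and mutable counter by direct structural recursion (simpler decomposition); equal return values on all integer inputs.


-- the divisor strictly shrinks in absolute value at each Euclidean step (termination of both ports)
theorem pvModNatAbsLt (m n : Int) (h : n ≠ 0) : (PySem.Int.mod m n).natAbs < n.natAbs := by
  rcases lt_or_gt_of_ne h with hn | hn
  · have := PySem.Int.mod_neg_bounds m hn
    omega
  · have h1 := PySem.Int.mod_nonneg m hn
    have h2 := PySem.Int.mod_lt m hn
    omega

-- ===== PORT A =====
-- A's while-True loop: state (m, n, cnt); n ≠ 0 is the loop invariant, carried as a hypothesis for termination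
def euclidesE1CntLoop (m n cnt : Int) (hn : n ≠ 0) : Int :=
  let r := PySem.Int.mod m n
  if h : r = 0 then cnt + 1
  else euclidesE1CntLoop n r (cnt + 1) h
termination_by n.natAbs
decreasing_by exact pvModNatAbsLt m n hn

def euclidesE1Cnt (m : Int) (n : Int) : Int :=
  if h : n = 0 then 0
  else euclidesE1CntLoop m n 0 h

-- ===== PORT B =====
def euclidesE1Cnt_alt (m : Int) (n : Int) : Int :=
  if h : n = 0 then 0
  else
    let r := PySem.Int.mod m n
    if hr : r = 0 then 1 else 1 + euclidesE1Cnt_alt n r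
termination_by n.natAbs
decreasing_by exact pvModNatAbsLt m n h

-- ===== PRECONDITION & SPEC =====
def Spec_euclidesE1Cnt (m : Int) (n : Int) (out : Int) : Prop := out = euclidesE1Cnt_alt m n
instance (m : Int) (n : Int) (out : Int) : Decidable (Spec_euclidesE1Cnt m n out) := by unfold Spec_euclidesE1Cnt; infer_instance

-- ===== CLAIM (what is proved, stated in full; the proofs are below) =====
def Claim_equal_euclidesE1Cnt : Prop := ∀ (m : Int) (n : Int), Dom_euclidesE1Cnt m n → Spec_euclidesE1Cnt m n (euclidesE1Cnt m n)

-- ===== LEMMAS AND PROOFS =====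
-- invariant: A's loop started with counter cnt computes cnt plus B's recursive count
theorem loop_eq_alt (m n cnt : Int) (hn : n ≠ 0) :
    euclidesE1CntLoop m n cnt hn = cnt + euclidesE1Cnt_alt m n := by
  induction m, n, cnt, hn using euclidesE1CntLoop.induct with
  | case1 m n cnt hn r hr =>
    have hr' : PySem.Int.mod m n = 0 := hr
    rw [euclidesE1CntLoop, euclidesE1Cnt_alt]
    dsimp only
    rw [dif_pos hr', dif_neg hn, dif_pos hr']
  | case2 m n cnt hn r hr ih =>
    have hr' : ¬ PySem.Int.mod m n = 0 := hr
    have ih' : euclidesE1CntLoop n (PySem.Int.mod m n) (cnt + 1) hr' =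
        (cnt + 1) + euclidesE1Cnt_alt n (PySem.Int.mod m n) := ih
    rw [euclidesE1CntLoop, euclidesE1Cnt_alt]
    dsimp only
    rw [dif_neg hr', dif_neg hn, dif_neg hr', ih']
    ring

-- ===== VERDICT (by name: the statement is the Claim_ definition above) =====
theorem euclidesE1Cnt_spec : Claim_equal_euclidesE1Cnt := by
  intro m n _
  unfold Spec_euclidesE1Cnt euclidesE1Cnt
  by_cases h : n = 0
  · simp [h, euclidesE1Cnt_alt]
  · rw [dif_neg h, loop_eq_alt, zero_add]
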